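-- pv_equiv track=rewrite | github.com/Maker-H/Study-Algorithm | 프로그래머스/lv0/120956. 옹알이 （1）/옹알이 （1）.py | solution
-- ===== SOURCE A (Python) =====
-- def solution(babbling):
--     answer = 0
--     for word in babbling:
--
--         flag = True
--         idx = 0
--         while idx < len(word):
--             if word[idx : 3 + idx] == 'aya' or word[idx : 3 + idx] == 'woo':
--                 idx += 3
--             elif word[idx : 2 + idx] == 'ye' or word[idx : 2 + idx] == 'ma':
--                 idx += 2
--             else:
--                 flag = False
--                 break
--
--         if flag:
--             answer += 1
--
--     return answer
-- ===== SOURCE B (Python) =====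
-- def solution(babbling):
--     tokens = ("aya", "woo", "ye", "ma")
--
--     def ok(w):
--         return not w or any(w.startswith(t) and ok(w[len(t):]) for t in tokens)
--
--     return sum(map(ok, babbling))
-- ===== Notes on version B (the rewrite author's own statement) =====
-- stated objective: simpler
-- what changed: Replaces the manual index-advancing while-loop with flag/break by a recursive suffix predicate over a token table (any + startswith) and a sum over the list.
import Mathlib
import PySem

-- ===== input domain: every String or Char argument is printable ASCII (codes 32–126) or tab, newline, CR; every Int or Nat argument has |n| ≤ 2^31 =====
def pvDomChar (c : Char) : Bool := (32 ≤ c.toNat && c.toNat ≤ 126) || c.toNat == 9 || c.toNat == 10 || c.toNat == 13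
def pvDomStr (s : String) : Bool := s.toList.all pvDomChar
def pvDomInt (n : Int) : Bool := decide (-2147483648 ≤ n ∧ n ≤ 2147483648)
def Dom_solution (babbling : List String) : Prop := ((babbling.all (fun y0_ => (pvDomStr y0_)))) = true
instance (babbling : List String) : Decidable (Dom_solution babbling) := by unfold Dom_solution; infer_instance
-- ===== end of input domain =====

-- B replaces A's manual index-advancing while-loop (flag/break) by a recursive suffix
-- predicate over a token table plus a sum; same cost, simpler decomposition.

-- ===== PORT A =====
-- the inner 'while idx < len(word)' loop of A; returns the final flag.
-- word[idx:3+idx] / word[idx:2+idx] with idx ≥ 0 are PySem.List.slice on the code points (exact).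
def solLoopA (w : List Char) (idx : Nat) : Bool :=
  if idx < w.length then
    if PySem.List.slice w (some (idx : Int)) (some ((3 + idx : Nat) : Int)) = ['a','y','a'] ∨
       PySem.List.slice w (some (idx : Int)) (some ((3 + idx : Nat) : Int)) = ['w','o','o'] then
      solLoopA w (idx + 3)
    else if PySem.List.slice w (some (idx : Int)) (some ((2 + idx : Nat) : Int)) = ['y','e'] ∨
            PySem.List.slice w (some (idx : Int)) (some ((2 + idx : Nat) : Int)) = ['m','a'] then
      solLoopA w (idx + 2)
    else
      false
  else
    true
termination_by w.length - idx
decreasing_by all_goals omega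

def solution (babbling : List String) : Int :=
  babbling.foldl (fun answer word => if solLoopA word.toList 0 then answer + 1 else answer) 0

-- ===== PORT B =====
def tokensB : List (List Char) := [['a','y','a'], ['w','o','o'], ['y','e'], ['m','a']]

-- ok(w) = not w or any(w.startswith(t) and ok(w[len(t):]) for t in tokens)
-- 'not w or …' is the if; startswith is PySem.Chars.startswith (exact); attach carries the
-- membership fact needed for termination only.
def okB (w : List Char) : Bool :=
  if w = [] then true
  else tokensB.attach.any (fun t => PySem.Chars.startswith w t.1 && okB (w.drop t.1.length))
termination_by w.length
decreasing_by
  have hw : w ≠ [] := by assumption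
  have ht := t.2
  have hlen : 1 ≤ t.1.length := by
    simp only [tokensB, List.mem_cons, List.not_mem_nil, or_false] at ht
    rcases ht with h | h | h | h <;> simp [h]
  have hw0 : w.length ≠ 0 := by simpa [List.length_eq_zero_iff] using hw
  simp only [List.length_drop]; omega

def solution_alt (babbling : List String) : Int :=
  (babbling.map (fun w => if okB w.toList then (1 : Int) else 0)).sum

-- ===== PRECONDITION & SPEC =====
def Spec_solution (babbling : List String) (out : Int) : Prop := out = solution_alt babbling
instance (babbling : List String) (out : Int) : Decidable (Spec_solution babbling out) := by unfold Spec_solution; infer_instance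

-- ===== CLAIM (what is proved, stated in full; the proofs are below) =====
def Claim_equal_solution : Prop := ∀ (babbling : List String), Dom_solution babbling → Spec_solution babbling (solution babbling)

-- ===== LEMMAS AND PROOFS =====

lemma startswith_eq_decide_take (s t : List Char) :
    PySem.Chars.startswith s t = decide (s.take t.length = t) := by
  by_cases ht : s.take t.length = t
  · have hp : t <+: s := List.prefix_iff_eq_take.mpr ht.symm
    have hb := (PySem.Chars.startswith_iff (s := s) (p := t)).mpr hp
    simp [ht, hb]
  · have hnp : ¬ t <+: s := fun hp => ht (List.prefix_iff_eq_take.mp hp).symm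
    have hb : PySem.Chars.startswith s t = false := by
      cases hcase : PySem.Chars.startswith s t
      · rfl
      · exact absurd ((PySem.Chars.startswith_iff (s := s) (p := t)).mp hcase) hnp
    simp [ht, hb]

lemma take2_of_take3 (s : List Char) (a b c : Char) (h : s.take 3 = [a, b, c]) :
    s.take 2 = [a, b] := by
  have h2 : s.take 2 = (s.take 3).take 2 := by
    simp [List.take_take]
  rw [h2, h]; rfl

lemma okB_eq_solLoopA (n : Nat) :
    ∀ (w : List Char) (idx : Nat), w.length - idx ≤ n →
      okB (w.drop idx) = solLoopA w idx := by
  induction n with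
  | zero =>
    intro w idx h
    have hge : w.length ≤ idx := by omega
    rw [okB, solLoopA]
    simp [List.drop_eq_nil_of_le hge, Nat.not_lt.mpr hge]
  | succ n ih =>
    intro w idx h
    by_cases hlt : idx < w.length
    · have hne : w.drop idx ≠ [] := by
        simp [List.drop_eq_nil_iff]; omega
      rw [okB, solLoopA]
      have hsl3 : PySem.List.slice w (some (idx : Int)) (some ((3 + idx : Nat) : Int))
          = (w.drop idx).take 3 := by
        rw [PySem.List.slice_natCast]; congr 1; omega
      have hsl2 : PySem.List.slice w (some (idx : Int)) (some ((2 + idx : Nat) : Int))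
          = (w.drop idx).take 2 := by
        rw [PySem.List.slice_natCast]; congr 1; omega
      have h3 : w.drop (idx + 3) = (w.drop idx).drop 3 := by
        rw [List.drop_drop]
      have h2 : w.drop (idx + 2) = (w.drop idx).drop 2 := by
        rw [List.drop_drop]
      have ih3 : okB (w.drop (idx + 3)) = solLoopA w (idx + 3) := ih w (idx + 3) (by omega)
      have ih2 : okB (w.drop (idx + 2)) = solLoopA w (idx + 2) := ih w (idx + 2) (by omega)
      simp only [hne, if_pos hlt, hsl3, hsl2, tokensB, List.attach_cons,
        List.attach_nil, List.any_cons, List.any_nil, List.any_map, Function.comp,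
        startswith_eq_decide_take, List.length_cons, List.length_nil,
        Bool.or_false]
      by_cases ha : (w.drop idx).take 3 = ['a','y','a']
      · have hw : ¬ (w.drop idx).take 3 = ['w','o','o'] := by rw [ha]; decide
        have hy : ¬ (w.drop idx).take 2 = ['y','e'] := by
          rw [take2_of_take3 _ _ _ _ ha]; decide
        have hm : ¬ (w.drop idx).take 2 = ['m','a'] := by
          rw [take2_of_take3 _ _ _ _ ha]; decide
        simp [ha, hy, hm, ← h3, ih3]
      · by_cases hw : (w.drop idx).take 3 = ['w','o','o']
        · have hy : ¬ (w.drop idx).take 2 = ['y','e'] := by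
            rw [take2_of_take3 _ _ _ _ hw]; decide
          have hm : ¬ (w.drop idx).take 2 = ['m','a'] := by
            rw [take2_of_take3 _ _ _ _ hw]; decide
          simp [hw, hy, hm, ← h3, ih3]
        · by_cases hy : (w.drop idx).take 2 = ['y','e']
          · have hm : ¬ (w.drop idx).take 2 = ['m','a'] := by rw [hy]; decide
            simp [ha, hw, hy, ← h2, ih2]
          · by_cases hm : (w.drop idx).take 2 = ['m','a']
            · simp [ha, hw, hm, ← h2, ih2]
            · simp [ha, hw, hy, hm]
    · have hge : w.length ≤ idx := by omega
      rw [okB, solLoopA]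
      simp [List.drop_eq_nil_of_le hge, Nat.not_lt.mpr hge]

lemma okB_eq_solLoopA_zero (w : List Char) : okB w = solLoopA w 0 := by
  have := okB_eq_solLoopA w.length w 0 (by omega)
  simpa using this

lemma foldl_count_eq (l : List String) :
    ∀ (a : Int),
      l.foldl (fun answer word => if solLoopA word.toList 0 then answer + 1 else answer) a
        = a + (l.map (fun w => if okB w.toList then (1 : Int) else 0)).sum := by
  induction l with
  | nil => intro a; simp
  | cons x xs ih =>
    intro a
    simp only [List.foldl_cons, List.map_cons, List.sum_cons, ih, okB_eq_solLoopA_zero]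
    split_ifs <;> ring

-- ===== VERDICT (by name: the statement is the Claim_ definition above) =====
theorem solution_spec : Claim_equal_solution := by
  intro babbling _
  unfold Spec_solution solution solution_alt
  simpa using foldl_count_eq babbling 0
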